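-- pv_equiv track=rewrite | github.com/Nihar04/CNLAB | Framing/Byte Stuffing.py | byte_unstuffing
-- ===== SOURCE A (Python) =====
-- def byte_unstuffing(stuffed_data, flag='f', escape='e'):
--     """
--     Performs byte unstuffing on the stuffed data.
--
--     Parameters:
--     - stuffed_data (str): The stuffed data string to be unstuffed.
--     - flag (str): The flag byte indicating the start/end of the frame.
--     - escape (str): The escape byte used for unstuffing.
--
--     Returns:
--     - str: The original unstuffed data string.
--     """
--     if not (stuffed_data.startswith(flag) and stuffed_data.endswith(flag)):
--         raise ValueError("Invalid stuffed data format")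
--
--     stuffed_data = stuffed_data[1:-1]  # Remove the start and end flags
--     unstuffed_data = ''
--     escape_next = False
--
--     for byte in stuffed_data:
--         if escape_next:
--             unstuffed_data += byte
--             escape_next = False
--         elif byte == escape:
--             escape_next = True
--         else:
--             unstuffed_data += byte
--
--     return unstuffed_data
-- ===== SOURCE B (Python) =====
-- def byte_unstuffing(stuffed_data, flag='f', escape='e'):
--     """Run-length decoding: each maximal run of k escape bytes decodes to
--     k//2 escape bytes (pairs decode to themselves, an odd trailing escape is
--     consumed by the byte after it), and every other byte is copied verbatim."""
--     if not (stuffed_data.startswith(flag) and stuffed_data.endswith(flag)):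
--         raise ValueError("Invalid stuffed data format")
--     body = stuffed_data[1:-1]
--     out = []
--     i = 0
--     n = len(body)
--     while i < n:
--         j = i
--         while j < n and body[j] == escape:
--             j += 1
--         out.append(escape * ((j - i) // 2))  # paired escapes decode to themselves
--         if j < n:
--             out.append(body[j])  # the byte after the run (escaped if run was odd)
--             j += 1
--         i = j
--     return ''.join(out)
-- ===== Notes on version B (the rewrite author's own statement) =====
-- stated objective: alternative
-- what changed: Replaces A's per-character escape_next state machine with run-length decoding: B counts each maximal run of k escape bytes, emits escape*(k//2) in one step (pairs decode to themselves, an odd run is consumed by the byte after it) and copies every other byte verbatim.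
import Mathlib
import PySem

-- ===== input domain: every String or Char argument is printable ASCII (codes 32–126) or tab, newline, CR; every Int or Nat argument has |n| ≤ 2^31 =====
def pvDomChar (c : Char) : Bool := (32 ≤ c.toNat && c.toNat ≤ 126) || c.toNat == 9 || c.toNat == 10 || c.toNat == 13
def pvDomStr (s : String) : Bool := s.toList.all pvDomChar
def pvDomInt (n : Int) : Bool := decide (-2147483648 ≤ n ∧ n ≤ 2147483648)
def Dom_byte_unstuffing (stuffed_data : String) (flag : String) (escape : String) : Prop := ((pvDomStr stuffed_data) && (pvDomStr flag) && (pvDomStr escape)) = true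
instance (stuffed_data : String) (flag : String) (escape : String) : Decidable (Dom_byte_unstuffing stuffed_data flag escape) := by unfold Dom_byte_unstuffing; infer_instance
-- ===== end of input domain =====

-- B replaces A's per-character escape_next state machine with run-length
-- decoding (each maximal run of k escape bytes becomes escape*(k//2), the byte
-- after it is copied verbatim); same return value wherever A returns.


-- ===== PORT A =====
-- A's for-loop: accumulator string + escape_next boolean, char by char.
def pvALoop (escape : List Char) (cs : List Char) (acc : List Char) (escapeNext : Bool) : List Char :=
  match cs with
  | [] => acc
  | c :: rest =>
    if escapeNext then pvALoop escape rest (acc ++ [c]) false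
    else if [c] = escape then pvALoop escape rest acc true
    else pvALoop escape rest (acc ++ [c]) false

def byte_unstuffing (stuffed_data : String) (flag : String) (escape : String) : String :=
  if PySem.Str.startswith stuffed_data flag && PySem.Str.endswith stuffed_data flag then
    String.ofList (pvALoop escape.toList
      (PySem.List.slice stuffed_data.toList (some 1) (some (-1))) [] false)
  else ""  -- Python raises ValueError here; excluded by Pre_

-- ===== PORT B =====
-- B's inner while loop: the length of the maximal leading run of escape bytes
-- (Python's  while j < n and body[j] == escape: j += 1).
def pvRun (escape : List Char) : List Char → Nat
  | [] => 0
  | c :: rest => if [c] = escape then pvRun escape rest + 1 else 0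

-- B's outer while loop: emit escape * (k // 2) for the run of k escape bytes,
-- then the byte after it verbatim, and continue behind it.
def pvBLoop (escape : List Char) (cs : List Char) : List Char :=
  if hcs : cs = [] then []
  else
    let k := pvRun escape cs
    (List.replicate (k / 2) escape).flatten      -- escape * (k // 2)
      ++ (cs.drop k).take 1                      -- if j < n: append body[j]; j += 1
      ++ pvBLoop escape (cs.drop (k + 1))        -- i = j; next round (no-op once past the end)
termination_by cs.length
decreasing_by
  have h1 : 0 < cs.length := List.length_pos_of_ne_nil hcs
  simp only [List.length_drop]
  omega

def byte_unstuffing_alt (stuffed_data : String) (flag : String) (escape : String) : String :=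
  if PySem.Str.startswith stuffed_data flag && PySem.Str.endswith stuffed_data flag then
    String.ofList (pvBLoop escape.toList
      (PySem.List.slice stuffed_data.toList (some 1) (some (-1))))
  else ""  -- Python raises ValueError here; excluded by Pre_

-- ===== PRECONDITION & SPEC =====
-- A raises ValueError unless the data starts and ends with the flag.
def Pre_byte_unstuffing (stuffed_data : String) (flag : String) (escape : String) : Prop :=
  PySem.Str.startswith stuffed_data flag = true ∧ PySem.Str.endswith stuffed_data flag = true
instance (stuffed_data : String) (flag : String) (escape : String) : Decidable (Pre_byte_unstuffing stuffed_data flag escape) := by unfold Pre_byte_unstuffing; infer_instance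

def pvWitness_byte_unstuffing : String × String × String := ("fxeeyf", "f", "e")

def Spec_byte_unstuffing (stuffed_data : String) (flag : String) (escape : String) (out : String) : Prop := out = byte_unstuffing_alt stuffed_data flag escape
instance (stuffed_data : String) (flag : String) (escape : String) (out : String) : Decidable (Spec_byte_unstuffing stuffed_data flag escape out) := by unfold Spec_byte_unstuffing; infer_instance

-- ===== CLAIM (what is proved, stated in full; the proofs are below) =====
def Claim_equal_byte_unstuffing : Prop := ∀ (stuffed_data : String) (flag : String) (escape : String), Dom_byte_unstuffing stuffed_data flag escape → Pre_byte_unstuffing stuffed_data flag escape → Spec_byte_unstuffing stuffed_data flag escape (byte_unstuffing stuffed_data flag escape)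

-- ===== LEMMAS AND PROOFS =====
-- proof-only middle man: the pair-consuming scan (an escape byte and the byte
-- after it are taken together); A and B are each shown equal to it
def pvC (escape : List Char) : List Char → List Char
  | [] => []
  | c :: rest =>
    if [c] = escape then
      match rest with
      | [] => []
      | d :: rest' => d :: pvC escape rest'
    else c :: pvC escape rest

-- A's state machine equals the pair-consuming scan
lemma pvA_eq_pvC (escape : List Char) (cs : List Char) : ∀ acc : List Char,
    pvALoop escape cs acc false = acc ++ pvC escape cs ∧
    pvALoop escape cs acc true =
      (match cs with
       | [] => acc
       | d :: rest' => (acc ++ [d]) ++ pvC escape rest') := by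
  induction cs with
  | nil => intro acc; simp [pvALoop, pvC]
  | cons c rest ih =>
    intro acc
    constructor
    · by_cases h : [c] = escape
      · conv_rhs => rw [pvC.eq_def]
        simp [pvALoop, h, (ih acc).2]
        cases rest <;> simp
      · conv_rhs => rw [pvC.eq_def]
        simp [pvALoop, h, (ih (acc ++ [c])).1]
    · simp [pvALoop, (ih (acc ++ [c])).1]

-- unfoldings of B's loop, one per shape of the leading run
lemma pvBLoop_nil (escape : List Char) : pvBLoop escape [] = [] := by
  rw [pvBLoop]; simp

lemma pvBLoop_nomatch (escape : List Char) (c : Char) (rest : List Char) (h : ¬ [c] = escape) :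
    pvBLoop escape (c :: rest) = c :: pvBLoop escape rest := by
  rw [pvBLoop]
  simp [pvRun, h]

lemma pvBLoop_single (escape : List Char) (c : Char) (h : [c] = escape) :
    pvBLoop escape [c] = [] := by
  rw [pvBLoop, ← h]
  simp [pvRun, pvBLoop_nil]

lemma pvBLoop_odd (escape : List Char) (c d : Char) (rest : List Char)
    (hc : [c] = escape) (hd : ¬ [d] = escape) :
    pvBLoop escape (c :: d :: rest) = d :: pvBLoop escape rest := by
  rw [pvBLoop]
  simp [pvRun, hc, hd]

lemma pvBLoop_pair (escape : List Char) (c d : Char) (rest : List Char)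
    (hc : [c] = escape) (hd : [d] = escape) :
    pvBLoop escape (c :: d :: rest) = escape ++ pvBLoop escape rest := by
  conv_lhs => rw [pvBLoop]
  have hk : pvRun escape (c :: d :: rest) = pvRun escape rest + 2 := by
    simp [pvRun, hc, hd]
  have hdiv : (pvRun escape rest + 2) / 2 = pvRun escape rest / 2 + 1 := by omega
  have hd1 : List.drop (pvRun escape rest + 2) (c :: d :: rest) =
      List.drop (pvRun escape rest) rest := rfl
  have hd2 : List.drop (pvRun escape rest + 2 + 1) (c :: d :: rest) =
      List.drop (pvRun escape rest + 1) rest := rfl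
  simp only [List.cons_ne_nil, dite_false, hk, hdiv, hd1, hd2,
             List.replicate_succ, List.flatten_cons, List.append_assoc]
  by_cases hr : rest = []
  · subst hr
    simp [pvRun, pvBLoop_nil]
  · conv_rhs => rw [pvBLoop]
    simp only [dif_neg hr, List.append_assoc]

-- the pair-consuming scan equals B's run-length decoding
lemma pvC_eq_pvB (escape : List Char) : ∀ (n : Nat) (cs : List Char), cs.length ≤ n →
    pvC escape cs = pvBLoop escape cs := by
  intro n
  induction n with
  | zero =>
    intro cs h
    have hcs : cs = [] := List.length_eq_zero_iff.mp (Nat.le_zero.mp h)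
    subst hcs
    rw [pvC, pvBLoop_nil]
  | succ n ih =>
    intro cs h
    match cs with
    | [] => rw [pvC, pvBLoop_nil]
    | c :: rest =>
      rw [pvC.eq_def]
      by_cases hc : [c] = escape
      · simp only [if_pos hc]
        match rest with
        | [] => rw [pvBLoop_single escape c hc]
        | d :: rest' =>
          by_cases hd : [d] = escape
          · show d :: pvC escape rest' = pvBLoop escape (c :: d :: rest')
            rw [pvBLoop_pair escape c d rest' hc hd,
                show (d :: pvC escape rest' : List Char) = [d] ++ pvC escape rest' from rfl, hd]
            exact congrArg (fun t => escape ++ t) (ih rest' (by simp at h; omega))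
          · show d :: pvC escape rest' = pvBLoop escape (c :: d :: rest')
            rw [pvBLoop_odd escape c d rest' hc hd]
            simp only [List.cons.injEq, true_and]
            exact ih rest' (by simp at h; omega)
      · simp only [if_neg hc]
        rw [pvBLoop_nomatch escape c rest hc]
        simp only [List.cons.injEq, true_and]
        exact ih rest (by simp at h; omega)

-- ===== VERDICT (by name: the statement is the Claim_ definition above) =====
theorem byte_unstuffing_spec : Claim_equal_byte_unstuffing := by
  intro s f e _ hpre
  unfold Spec_byte_unstuffing byte_unstuffing byte_unstuffing_alt
  rw [hpre.1, hpre.2]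
  simp only [Bool.and_self, if_pos]
  rw [(pvA_eq_pvC e.toList _ []).1, List.nil_append,
      pvC_eq_pvB e.toList (PySem.List.slice s.toList (some 1) (some (-1))).length _ le_rfl]
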